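-- pv_equiv track=rewrite | github.com/sarthak25-rgb/aarya-chat-api | chatapp/services/memory_store.py | _post_guard
-- ===== SOURCE A (Python) =====
-- REFUSAL_TEXT = "Sorry i Cant help you In this"
--
-- def _post_guard(answer: str) -> str:
--     """
--     Hard safety guard to block conversational or out-of-scope replies.
--     """
--     if not answer:
--         return REFUSAL_TEXT
--
--     cleaned = answer.strip()
--
--     # exact refusal is always allowed
--     if cleaned == REFUSAL_TEXT:
--         return cleaned
--
--     banned_phrases = [
--         "happy to help",
--         "i can help",
--         "i can try",
--         "i would be happy",
--         "i'm aarya",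
--         "i am aarya",
--         "what kind of",
--         "how can i help",
--         "clarify",
--         "general guidance",
--         "point you in the right",
--         "feel free",
--         "let me know",
--     ]
--
--     low = cleaned.lower()
--
--     if any(p in low for p in banned_phrases):
--         return REFUSAL_TEXT
--
--     return cleaned
-- ===== SOURCE B (Python) =====
-- REFUSAL_TEXT = "Sorry i Cant help you In this"
--
-- _BANNED = [
--     "happy to help",
--     "i can help",
--     "i can try",
--     "i would be happy",
--     "i'm aarya",
--     "i am aarya",
--     "what kind of",
--     "how can i help",
--     "clarify",
--     "general guidance",
--     "point you in the right",
--     "feel free",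
--     "let me know",
-- ]
--
--
-- def _has_banned(low: str) -> bool:
--     # single left-to-right scan: at each position, does some banned phrase start here?
--     while low:
--         if any(low.startswith(p) for p in _BANNED):
--             return True
--         low = low[1:]
--     return False
--
--
-- def _post_guard(answer: str) -> str:
--     if not answer:
--         return REFUSAL_TEXT
--     cleaned = answer.strip()
--     if cleaned == REFUSAL_TEXT:
--         return cleaned
--     if _has_banned(cleaned.lower()):
--         return REFUSAL_TEXT
--     return cleaned
-- ===== Notes on version B (the rewrite author's own statement) =====
-- stated objective: alternative
-- what changed: Replaces the 13 independent substring-containment scans (any(p in low for p in banned)) with a single left-to-right scan of the lowercased string that at each position checks whether some banned phrase starts there.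
import Mathlib
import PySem

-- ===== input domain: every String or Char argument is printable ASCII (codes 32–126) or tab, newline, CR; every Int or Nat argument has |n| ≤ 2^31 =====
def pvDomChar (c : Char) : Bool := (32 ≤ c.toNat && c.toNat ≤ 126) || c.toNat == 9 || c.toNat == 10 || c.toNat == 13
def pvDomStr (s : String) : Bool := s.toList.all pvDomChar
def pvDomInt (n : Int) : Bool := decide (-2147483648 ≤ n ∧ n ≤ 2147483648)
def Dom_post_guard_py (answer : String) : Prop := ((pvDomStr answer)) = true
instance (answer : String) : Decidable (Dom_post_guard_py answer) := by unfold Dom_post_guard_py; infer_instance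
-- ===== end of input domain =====

-- B replaces A's 13 independent `p in low` substring scans with one left-to-right scan
-- of the lowercased string checking at each position whether some banned phrase starts
-- there (objective: alternative algorithm of similar cost).

-- ===== PORT A =====
def pvRefusal : String := "Sorry i Cant help you In this"

def pvBannedA : List String :=
  ["happy to help", "i can help", "i can try", "i would be happy",
   "i'm aarya", "i am aarya", "what kind of", "how can i help",
   "clarify", "general guidance", "point you in the right",
   "feel free", "let me know"]

def post_guard_py (answer : String) : String :=
  if answer = "" then pvRefusal
  else
    let cleaned := PySem.Str.strip answer
    if cleaned = pvRefusal then cleaned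
    else
      let low := PySem.Str.lower cleaned
      if pvBannedA.any (fun p => PySem.Str.isIn p low) then pvRefusal
      else cleaned

-- ===== PORT B =====
-- Source B's banned string constants, ported as char lists (exact: string literals over List Char)
def pvBannedB : List (List Char) :=
  ["happy to help".toList, "i can help".toList, "i can try".toList, "i would be happy".toList,
   "i'm aarya".toList, "i am aarya".toList, "what kind of".toList, "how can i help".toList,
   "clarify".toList, "general guidance".toList, "point you in the right".toList,
   "feel free".toList, "let me know".toList]

-- Source B's `_has_banned` while-loop: structural recursion on the suffix `low`
def pvHasBanned (low : List Char) : Bool :=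
  match low with
  | [] => false
  | _ :: t =>
    if pvBannedB.any (fun p => PySem.Chars.startswith low p) then true
    else pvHasBanned t

def post_guard_py_alt (answer : String) : String :=
  if answer = "" then pvRefusal
  else
    let cleaned := PySem.Str.strip answer
    if cleaned = pvRefusal then cleaned
    else if pvHasBanned (PySem.Chars.lower cleaned.toList) then pvRefusal
    else cleaned

-- ===== PRECONDITION & SPEC =====
def Spec_post_guard_py (answer : String) (out : String) : Prop := out = post_guard_py_alt answer
instance (answer : String) (out : String) : Decidable (Spec_post_guard_py answer out) := by unfold Spec_post_guard_py; infer_instance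

-- ===== CLAIM (what is proved, stated in full; the proofs are below) =====
def Claim_equal_post_guard_py : Prop := ∀ (answer : String), Dom_post_guard_py answer → Spec_post_guard_py answer (post_guard_py answer)

-- ===== LEMMAS AND PROOFS =====

-- `p in (c :: t)` ↔ p starts at the head or occurs in the tail
lemma pv_isIn_cons (p : List Char) (c : Char) (t : List Char) :
    PySem.Chars.isIn p (c :: t) =
      (PySem.Chars.startswith (c :: t) p || PySem.Chars.isIn p t) := by
  rw [Bool.eq_iff_iff]
  simp [PySem.Chars.isIn_iff_infix, PySem.Chars.startswith_iff, List.infix_cons_iff]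

-- B's single scan computes A's any-containment test
lemma pv_scan_eq (m : List Char) :
    pvHasBanned m = pvBannedB.any (fun p => PySem.Chars.isIn p m) := by
  induction m with
  | nil => decide
  | cons c t ih =>
    show (if pvBannedB.any (fun p => PySem.Chars.startswith (c :: t) p) then true
          else pvHasBanned t) = _
    have hsplit : pvBannedB.any (fun p => PySem.Chars.isIn p (c :: t)) =
        (pvBannedB.any (fun p => PySem.Chars.startswith (c :: t) p)
          || pvBannedB.any (fun p => PySem.Chars.isIn p t)) := by
      rw [Bool.eq_iff_iff]
      simp only [List.any_eq_true, pv_isIn_cons, Bool.or_eq_true]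
      exact ⟨fun ⟨p, hp, h⟩ => h.elim (fun h => Or.inl ⟨p, hp, h⟩) (fun h => Or.inr ⟨p, hp, h⟩),
        fun h => h.elim (fun ⟨p, hp, h⟩ => ⟨p, hp, Or.inl h⟩) (fun ⟨p, hp, h⟩ => ⟨p, hp, Or.inr h⟩)⟩
    rw [hsplit, ← ih]
    cases pvBannedB.any (fun p => PySem.Chars.startswith (c :: t) p) <;> simp

lemma pv_bannedB_eq_map : pvBannedB = pvBannedA.map String.toList := by decide

-- ===== VERDICT (by name: the statement is the Claim_ definition above) =====
theorem post_guard_py_spec : Claim_equal_post_guard_py := by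
  intro answer _
  unfold Spec_post_guard_py post_guard_py post_guard_py_alt
  by_cases h1 : answer = ""
  · simp [h1]
  · simp only [h1, if_false]
    by_cases h2 : PySem.Str.strip answer = pvRefusal
    · simp [h2]
    · simp only [h2, if_false]
      have : pvHasBanned (PySem.Chars.lower (PySem.Str.strip answer).toList) =
          pvBannedA.any (fun p => PySem.Str.isIn p (PySem.Str.lower (PySem.Str.strip answer))) := by
        rw [pv_scan_eq, pv_bannedB_eq_map, List.any_map]
        simp [PySem.Str.isIn, Function.comp_def]
      rw [this]
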